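-- pv_equiv track=rewrite | github.com/LuisAwtani/Big_2_bot | BernardoBots/base.py | findFullHouses
-- ===== SOURCE A (Python) =====
-- from collections import defaultdict
-- from itertools import combinations, product
--
-- def findFullHouses(hand):
--     fullHouses = []
--     rankDict = defaultdict(list)
--     for card in hand:
--         rankDict[card[0]].append(card)
--     tripleRanks = [rank for rank, cards in rankDict.items() if len(cards) >= 3]
--     pairRanks = [rank for rank, cards in rankDict.items() if len(cards) >= 2]
--     for tripleRank in tripleRanks:
--         triples = list(combinations(rankDict[tripleRank], 3))
--         for triple in triples:
--             for pairRank in pairRanks: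
--                 if pairRank != tripleRank:
--                     pairs = list(combinations(rankDict[pairRank], 2))
--                     for pair in pairs:
--                         fullHouses.append(list(triple) + list(pair))
--     return fullHouses
-- ===== SOURCE B (Python) =====
-- def findFullHouses(hand):
--     def choose(cards, k):
--         # itertools-free k-combinations in lexicographic (index) order
--         if k == 0:
--             return [[]]
--         if len(cards) < k:
--             return []
--         first, rest = cards[0], cards[1:]
--         return [[first] + tail for tail in choose(rest, k - 1)] + choose(rest, k)
--
--     def splitRanks(cards):
--         # recursively peel off the group of the first card's rank
--         if not cards:
--             return []
--         r = cards[0][0]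
--         same = [c for c in cards if c[0] == r]
--         other = [c for c in cards if c[0] != r]
--         return [(r, same)] + splitRanks(other)
--
--     groups = splitRanks(hand)
--     return [t + p
--             for (tr, g) in groups
--             for t in choose(g, 3)
--             for (pr, h) in groups if pr != tr
--             for p in choose(h, 2)]
-- ===== Notes on version B (the rewrite author's own statement) =====
-- stated objective: alternative
-- what changed: B replaces the defaultdict grouping and itertools.combinations with a recursive partition of the hand into rank groups (peeling off the first card's rank each step) and a hand-rolled recursive k-combination generator, combining them in one list comprehension.
import Mathlib
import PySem

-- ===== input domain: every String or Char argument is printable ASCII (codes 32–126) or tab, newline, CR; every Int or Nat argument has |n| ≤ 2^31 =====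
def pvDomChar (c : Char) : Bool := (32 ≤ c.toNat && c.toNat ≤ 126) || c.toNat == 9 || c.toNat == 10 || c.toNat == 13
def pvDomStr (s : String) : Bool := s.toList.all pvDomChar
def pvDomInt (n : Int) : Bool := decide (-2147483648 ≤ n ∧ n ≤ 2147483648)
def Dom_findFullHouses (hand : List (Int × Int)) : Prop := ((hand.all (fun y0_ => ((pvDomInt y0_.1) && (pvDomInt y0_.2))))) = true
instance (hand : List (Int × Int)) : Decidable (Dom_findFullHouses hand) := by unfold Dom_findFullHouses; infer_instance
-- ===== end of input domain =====

-- B replaces the defaultdict grouping and itertools.combinations with a recursive partition of the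
-- hand into rank groups plus a hand-rolled recursive k-combination generator (alternative decomposition).

-- ===== PORT A =====
def findFullHouses (hand : List (Int × Int)) : List (List (Int × Int)) :=
  let rankDict : PySem.Dict Int (List (Int × Int)) :=
    hand.foldl (fun d card => d.modify card.1 [] (· ++ [card])) PySem.Dict.empty
  let tripleRanks := (rankDict.items.filter (fun p => decide (3 ≤ p.2.length))).map (·.1)
  let pairRanks := (rankDict.items.filter (fun p => decide (2 ≤ p.2.length))).map (·.1)
  tripleRanks.foldl (fun acc tripleRank =>
    let triples := PySem.List.combinations (rankDict.getD tripleRank []) 3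
    triples.foldl (fun acc triple =>
      pairRanks.foldl (fun acc pairRank =>
        if pairRank ≠ tripleRank then
          let pairs := PySem.List.combinations (rankDict.getD pairRank []) 2
          pairs.foldl (fun acc pair => acc ++ [triple ++ pair]) acc
        else acc) acc) acc) []

-- ===== PORT B =====
-- B's hand-rolled recursive combinations (choose in Source B)
def pvChoose : List (Int × Int) → Nat → List (List (Int × Int))
  | _, 0 => [[]]
  | [], _ + 1 => []
  | first :: rest, k + 1 =>
      if rest.length + 1 < k + 1 then []
      else ((pvChoose rest k).map (first :: ·)) ++ pvChoose rest (k + 1)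

-- B's recursive partition into rank groups (splitRanks in Source B)
def pvSplitRanks : List (Int × Int) → List (Int × List (Int × Int))
  | [] => []
  | c :: rest =>
      (c.1, (c :: rest).filter (fun x => x.1 == c.1)) ::
        pvSplitRanks ((c :: rest).filter (fun x => x.1 != c.1))
  termination_by l => l.length
  decreasing_by
    simp only [List.filter_cons, bne_self_eq_false, List.length_cons]
    exact Nat.lt_succ_of_le (List.length_filter_le _ _)

def findFullHouses_alt (hand : List (Int × Int)) : List (List (Int × Int)) :=
  let groups := pvSplitRanks hand
  groups.flatMap (fun g =>
    (pvChoose g.2 3).flatMap (fun t =>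
      groups.flatMap (fun h =>
        if h.1 ≠ g.1 then (pvChoose h.2 2).map (fun p => t ++ p) else [])))

-- ===== PRECONDITION & SPEC =====
def Spec_findFullHouses (hand : List (Int × Int)) (out : List (List (Int × Int))) : Prop := out = findFullHouses_alt hand
instance (hand : List (Int × Int)) (out : List (List (Int × Int))) : Decidable (Spec_findFullHouses hand out) := by unfold Spec_findFullHouses; infer_instance

-- ===== CLAIM (what is proved, stated in full; the proofs are below) =====
def Claim_equal_findFullHouses : Prop := ∀ (hand : List (Int × Int)), Dom_findFullHouses hand → Spec_findFullHouses hand (findFullHouses hand)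

-- ===== LEMMAS AND PROOFS =====

-- B's choose is itertools.combinations
lemma pvChoose_eq (cards : List (Int × Int)) : ∀ k, pvChoose cards k = PySem.List.combinations cards k := by
  induction cards with
  | nil =>
    intro k; cases k with
    | zero => simp [pvChoose, PySem.List.combinations_zero]
    | succ k => simp [pvChoose, PySem.List.combinations_nil_succ]
  | cons c rest ih =>
    intro k; cases k with
    | zero => simp [pvChoose, PySem.List.combinations_zero]
    | succ k =>
      by_cases h : rest.length + 1 < k + 1
      · rw [pvChoose, if_pos h,
          PySem.List.combinations_eq_nil_of_length_lt (xs := c :: rest) (by simpa using h)]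
      · rw [pvChoose, if_neg h, ih, ih, PySem.List.combinations_cons_succ]

-- the canonical rank grouping both programs compute: first-occurrence rank order, cards in hand order
def pvGroups (hand : List (Int × Int)) : List (Int × List (Int × Int)) :=
  (PySem.Set.ofList (hand.map (·.1))).map (fun r => (r, hand.filter (fun c => c.1 == r)))

lemma filter_ofList (p : Int → Bool) (l : List Int) :
    (PySem.Set.ofList l).filter p = PySem.Set.ofList (l.filter p) := by
  induction l using List.reverseRecOn with
  | nil => rfl
  | append_singleton xs x ih =>
    rw [PySem.Set.ofList_append_singleton, List.filter_append]
    by_cases hp : p x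
    · rw [show List.filter p [x] = [x] by simp [hp], PySem.Set.ofList_append_singleton]
      by_cases hx : x ∈ xs
      · rw [PySem.Set.add_of_mem (by simpa [PySem.Set.mem_ofList] using hx), ih,
          PySem.Set.add_of_mem (by simp [PySem.Set.mem_ofList, List.mem_filter, hx, hp])]
      · rw [PySem.Set.add_of_not_mem (by simpa [PySem.Set.mem_ofList] using hx),
          List.filter_append, ih, show List.filter p [x] = [x] by simp [hp],
          PySem.Set.add_of_not_mem (by simp [PySem.Set.mem_ofList, List.mem_filter, hx])]
    · rw [show List.filter p [x] = [] by simp [hp], List.append_nil]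
      by_cases hx : x ∈ xs
      · rw [PySem.Set.add_of_mem (by simpa [PySem.Set.mem_ofList] using hx), ih]
      · rw [PySem.Set.add_of_not_mem (by simpa [PySem.Set.mem_ofList] using hx),
          List.filter_append, ih, show List.filter p [x] = [] by simp [hp], List.append_nil]

lemma discard_eq_filter (s : List Int) (x : Int) :
    PySem.Set.discard s x = s.filter (fun y => y != x) := by
  simp [PySem.Set.discard, bne]

lemma pvSplitRanks_eq (hand : List (Int × Int)) : pvSplitRanks hand = pvGroups hand := by
  induction hand using pvSplitRanks.induct with
  | case1 => simp [pvSplitRanks, pvGroups]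
  | case2 c rest ih =>
    rw [pvSplitRanks, ih]
    unfold pvGroups
    rw [List.map_cons, PySem.Set.ofList_cons, discard_eq_filter, filter_ofList,
      List.filter_map, List.map_cons]
    congr 1
    have hother : List.filter (fun x => x.1 != c.1) (c :: rest)
        = List.filter (fun x => x.1 != c.1) rest := by
      simp
    rw [hother]
    refine List.map_congr_left (fun r hr => ?_)
    have hrne : r ≠ c.1 := by
      rcases List.mem_map.1 ((PySem.Set.mem_ofList _ _).1 hr) with ⟨x, hx, hfx⟩
      rw [← hfx]
      simpa using (List.mem_filter.1 hx).2
    have : List.filter (fun x => x.1 == r) (List.filter (fun x => x.1 != c.1) rest)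
        = List.filter (fun x => x.1 == r) (c :: rest) := by
      rw [List.filter_filter]
      rw [List.filter_cons]
      have hcr : ((c.1 : Int) == r) = false := beq_eq_false_iff_ne.2 (Ne.symm hrne)
      simp only [hcr, Bool.false_eq_true, if_false]
      refine List.filter_congr (fun x _ => ?_)
      by_cases h : x.1 = r <;> simp [h, hrne]
    rw [this]

lemma pvRankDict_getD (hand : List (Int × Int)) (r : Int) :
    (hand.foldl (fun d card => d.modify card.1 [] (· ++ [card])) PySem.Dict.empty).getD r []
      = hand.filter (fun c => c.1 == r) := by
  have h := PySem.Dict.getD_foldl_modify_append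
    (l := hand.map (fun c => (c.1, c))) (d := PySem.Dict.empty) (c := r)
  rw [List.foldl_map] at h
  simpa [List.filter_map, List.map_map, Function.comp_def] using h

lemma pvRankDict_items (hand : List (Int × Int)) :
    (hand.foldl (fun d card => d.modify card.1 [] (· ++ [card])) PySem.Dict.empty).items
      = pvGroups hand := by
  have hk : (hand.foldl (fun d card => d.modify card.1 [] (· ++ [card])) PySem.Dict.empty).keys
      = PySem.Set.ofList (hand.map (·.1)) := by
    rw [PySem.Dict.keys_foldl_modify_key (key := fun c : Int × Int => c.1)
      (f := fun _ card => (· ++ [card]))]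
    simp [PySem.Set.update_nil_left]
  have hnd := PySem.Dict.nodup_keys_foldl_modify_key hand (fun c => c.1) []
    (fun _ card => (· ++ [card])) PySem.Dict.empty PySem.Dict.nodup_keys_empty
  rw [PySem.Dict.items_eq_map_keys _ hnd [], hk]
  exact List.map_congr_left fun r _ => by rw [pvRankDict_getD]

lemma pvGroups_snd {hand : List (Int × Int)} {p : Int × List (Int × Int)}
    (hp : p ∈ pvGroups hand) : p.2 = hand.filter (fun c => c.1 == p.1) := by
  rcases List.mem_map.1 hp with ⟨r, _, rfl⟩; rfl

lemma ite_append_acc {α : Type} (c : Prop) [Decidable c] (acc x : List α) :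
    (if c then acc ++ x else acc) = acc ++ (if c then x else []) := by
  split_ifs <;> simp

lemma flatMap_filter {α β : Type} (l : List α) (p : α → Bool) (g : α → List β) :
    (l.filter p).flatMap g = l.flatMap (fun x => if p x then g x else []) := by
  induction l with
  | nil => rfl
  | cons x t ih => by_cases h : p x <;> simp [List.flatMap_cons, h, ih]

-- the common normal form both ports reduce to
def pvNorm (hand : List (Int × Int)) : List (List (Int × Int)) :=
  let items := pvGroups hand
  items.flatMap (fun p =>
    if 3 ≤ p.2.length then
      (PySem.List.combinations p.2 3).flatMap (fun triple =>
        items.flatMap (fun q =>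
          if 2 ≤ q.2.length then
            if q.1 ≠ p.1 then (PySem.List.combinations q.2 2).map (fun pair => triple ++ pair)
            else []
          else []))
    else [])

lemma a_eq_norm (hand : List (Int × Int)) : findFullHouses hand = pvNorm hand := by
  simp only [findFullHouses, pvNorm, pvRankDict_items,
    PySem.List.foldl_append_singleton_eq_map, ite_append_acc,
    PySem.List.foldl_append_eq_flatMap, List.nil_append,
    List.flatMap_map, flatMap_filter, decide_eq_true_eq]
  refine List.flatMap_congr (fun p hp => ?_)
  by_cases h3 : 3 ≤ p.2.length
  · simp only [if_pos h3]
    rw [pvRankDict_getD, ← pvGroups_snd hp]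
    refine List.flatMap_congr (fun triple _ => ?_)
    refine List.flatMap_congr (fun q hq => ?_)
    by_cases h2 : 2 ≤ q.2.length
    · simp only [if_pos h2]
      by_cases hne : q.1 = p.1
      · simp [hne]
      · rw [if_pos hne, if_pos hne, pvRankDict_getD, ← pvGroups_snd hq]
    · simp [h2]
  · simp [h3]

lemma b_eq_norm (hand : List (Int × Int)) : findFullHouses_alt hand = pvNorm hand := by
  simp only [findFullHouses_alt, pvNorm, pvSplitRanks_eq, pvChoose_eq]
  refine List.flatMap_congr (fun p hp => ?_)
  by_cases h3 : 3 ≤ p.2.length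
  · simp only [if_pos h3]
    refine List.flatMap_congr (fun triple _ => ?_)
    refine List.flatMap_congr (fun q hq => ?_)
    by_cases h2 : 2 ≤ q.2.length
    · simp [h2]
    · have hnil : PySem.List.combinations q.2 2 = [] :=
        PySem.List.combinations_eq_nil_of_length_lt _ (by omega)
      simp [h2, hnil]
  · have hnil : PySem.List.combinations p.2 3 = [] :=
      PySem.List.combinations_eq_nil_of_length_lt _ (by omega)
    simp [h3, hnil]

-- ===== VERDICT (by name: the statement is the Claim_ definition above) =====
theorem findFullHouses_spec : Claim_equal_findFullHouses := by
  intro hand _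
  unfold Spec_findFullHouses
  rw [a_eq_norm, b_eq_norm]
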